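-- pv_equiv track=rewrite | github.com/Manavvv13/DSA | CountAndLargest.py | count_and_largest
-- ===== SOURCE A (Python) =====
-- def count_and_largest(num):
--     count = 0
--     largestDigit = 0
--
--     while num > 0:
--         lastDigit = num % 10
--         if lastDigit > largestDigit:
--             largestDigit = lastDigit
--         num = num // 10
--         count += 1
--     return count, largestDigit
-- ===== SOURCE B (Python) =====
-- def count_and_largest(num):
--     # Work on the decimal string instead of repeated % / // arithmetic.
--     if num <= 0:
--         return (0, 0)
--     s = str(num)
--     return (len(s), max(int(c) for c in s))
-- ===== Notes on version B (the rewrite author's own statement) =====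
-- stated objective: idiomatic
-- what changed: B reads the digit count and the largest digit off the decimal string str(num) (len and max over characters) instead of A's while-loop of repeated %10 and //10 arithmetic.
import Mathlib
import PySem

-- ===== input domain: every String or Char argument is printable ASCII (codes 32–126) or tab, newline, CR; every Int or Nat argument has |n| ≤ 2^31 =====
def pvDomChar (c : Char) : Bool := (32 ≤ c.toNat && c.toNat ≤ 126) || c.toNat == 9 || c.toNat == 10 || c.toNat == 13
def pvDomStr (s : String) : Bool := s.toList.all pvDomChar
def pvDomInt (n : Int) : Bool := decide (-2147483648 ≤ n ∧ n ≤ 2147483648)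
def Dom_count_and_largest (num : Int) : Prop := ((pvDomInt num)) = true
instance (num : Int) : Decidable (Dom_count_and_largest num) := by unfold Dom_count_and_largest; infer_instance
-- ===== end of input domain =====

-- B reads the answer off the decimal string of num instead of A's %10 // 10 loop.

-- ===== PORT A =====
-- the while-loop of A: state (num, count, largestDigit)
def calLoop (num count largest : Int) : Int × Int :=
  if h : num > 0 then
    let lastDigit := PySem.Int.mod num 10
    let largest' := if lastDigit > largest then lastDigit else largest
    calLoop (PySem.Int.floordiv num 10) (count + 1) largest'
  else
    (count, largest)
termination_by num.toNat
decreasing_by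
  have h10 : PySem.Int.floordiv num 10 = num / 10 :=
    Int.fdiv_eq_ediv_of_nonneg _ (by omega)
  rw [h10]; omega

def count_and_largest (num : Int) : Int × Int := calLoop num 0 0

-- ===== PORT B =====
def count_and_largest_alt (num : Int) : Int × Int :=
  if num ≤ 0 then (0, 0)
  else
    let s := PySem.Int.toStr num
    -- int(c) for a decimal-digit character c is exactly its code minus 48
    let ds := s.toList.map (fun c => ((c.toNat : Int) - 48))
    (PySem.Str.len s,
      match PySem.List.max? ds (fun x => x) with
      | some m => m
      | none => 0)   -- unreachable: s is nonempty (Python max would raise only on empty)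

-- ===== PRECONDITION & SPEC =====
def Spec_count_and_largest (num : Int) (out : Int × Int) : Prop := out = count_and_largest_alt num
instance (num : Int) (out : Int × Int) : Decidable (Spec_count_and_largest num out) := by unfold Spec_count_and_largest; infer_instance

-- ===== CLAIM (what is proved, stated in full; the proofs are below) =====
def Claim_equal_count_and_largest : Prop := ∀ (num : Int), Dom_count_and_largest num → Spec_count_and_largest num (count_and_largest num)

-- ===== LEMMAS AND PROOFS =====

-- Nat.toDigits agrees with Nat.digits (big-endian characters) on positive n
lemma toDigitsCore_eq_digits : ∀ (fuel n : Nat) (acc : List Char), 0 < n → n < fuel →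
    Nat.toDigitsCore 10 fuel n acc = ((Nat.digits 10 n).map Nat.digitChar).reverse ++ acc := by
  intro fuel
  induction fuel with
  | zero => intro n acc hn hf; omega
  | succ f ih =>
    intro n acc hn hf
    rw [Nat.toDigitsCore]
    have hdig : Nat.digits 10 n = n % 10 :: Nat.digits 10 (n / 10) :=
      Nat.digits_def' (by norm_num) hn
    by_cases h0 : n / 10 = 0
    · rw [if_pos h0, hdig, h0]
      simp
    · rw [if_neg h0]
      rw [ih (n / 10) ((n % 10).digitChar :: acc) (by omega) (by omega), hdig]
      simp

lemma toDigits_eq_digits (n : Nat) (hn : 0 < n) :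
    Nat.toDigits 10 n = ((Nat.digits 10 n).map Nat.digitChar).reverse := by
  have := toDigitsCore_eq_digits (n + 1) n [] hn (by omega)
  simpa [Nat.toDigits] using this

lemma digitChar_val (d : Nat) (hd : d < 10) :
    ((Nat.digitChar d).toNat : Int) - 48 = (d : Int) := by
  interval_cases d <;> decide

-- A's loop computes the digit list's length and running maximum
lemma loopA_eq (n : Nat) : ∀ (c l : Int),
    calLoop (n : Int) c l =
      (c + (Nat.digits 10 n).length,
       List.foldl max l ((Nat.digits 10 n).map (fun d : Nat => (d : Int)))) := by
  induction n using Nat.strong_induction_on with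
  | _ n ih =>
    intro c l
    rcases Nat.eq_zero_or_pos n with h0 | hp
    · subst h0; rw [calLoop]; simp
    · rw [calLoop]
      have hpos : ((n : Int) > 0) := by exact_mod_cast hp
      rw [dif_pos hpos]
      have hm : PySem.Int.mod (n : Int) 10 = ((n % 10 : Nat) : Int) := by
        simp [PySem.Int.mod, Int.fmod_eq_emod]
      have hd : PySem.Int.floordiv (n : Int) 10 = ((n / 10 : Nat) : Int) := by
        simp [PySem.Int.floordiv, Int.fdiv_eq_ediv_of_nonneg]
      simp only [hm, hd]
      rw [ih (n / 10) (by omega), Nat.digits_def' (by norm_num : (1:Nat) < 10) hp]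
      simp only [List.map_cons, List.foldl_cons, List.length_cons, Prod.mk.injEq]
      refine ⟨by omega, ?_⟩
      congr 1
      rw [max_def]
      split_ifs <;> omega

lemma max?_cons (y : Int) (ys : List Int) :
    PySem.List.max? (y :: ys) (fun x : Int => x) = some (List.foldl max y ys) := by
  induction ys generalizing y with
  | nil => rfl
  | cons x xs ih =>
    have h1 : PySem.List.max? (y :: x :: xs) (fun z : Int => z)
        = PySem.List.max? (max y x :: xs) (fun z : Int => z) := by
      simp only [PySem.List.max?, List.foldl_cons]
      congr 1
      show (if y < x then some x else some y) = some (max y x)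
      rw [max_def]
      split_ifs <;> simp_all <;> omega
    rw [h1, ih, List.foldl_cons]

lemma foldl_max_perm {l l' : List Int} (h : l.Perm l') (a : Int) :
    List.foldl max a l = List.foldl max a l' := by
  exact h.foldl_eq a

-- ===== VERDICT (by name: the statement is the Claim_ definition above) =====
theorem count_and_largest_spec : Claim_equal_count_and_largest := by
  intro num _
  unfold Spec_count_and_largest count_and_largest count_and_largest_alt
  by_cases hle : num ≤ 0
  · rw [calLoop, dif_neg (by omega), if_pos hle]
  · rw [if_neg hle]
    have hn : num = ((num.toNat : Nat) : Int) := by omega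
    set n := num.toNat with hdef
    have hp : 0 < n := by omega
    rw [hn, loopA_eq n 0 0]
    have hchars : (PySem.Int.toStr (n : Int)).toList
        = ((Nat.digits 10 n).map Nat.digitChar).reverse := by
      rw [PySem.Int.toList_toStr, PySem.Int.toChars]
      rw [if_neg (by omega)]
      simp only [Int.toNat_natCast]
      exact toDigits_eq_digits n hp
    have hds : ((Nat.digits 10 n).map Nat.digitChar).reverse.map (fun c => ((c.toNat : Int) - 48))
        = ((Nat.digits 10 n).map (fun d : Nat => (d : Int))).reverse := by
      rw [List.map_reverse, List.map_map]
      congr 1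
      refine List.map_congr_left (fun d hdmem => ?_)
      exact digitChar_val d (Nat.digits_lt_base (by norm_num) hdmem)
    simp only [PySem.Str.len, hchars, hds]
    -- the digit list is nonempty
    have hne : ((Nat.digits 10 n).map (fun d : Nat => (d : Int))) ≠ [] := by
      simp [Nat.digits_ne_nil_iff_ne_zero, hp.ne']
    set L := (Nat.digits 10 n).map (fun d : Nat => (d : Int)) with hL
    have hrevne : L.reverse ≠ [] := by
      simpa using hne
    obtain ⟨y, ys, hys⟩ := List.exists_cons_of_ne_nil hrevne
    have hmax : PySem.List.max? L.reverse (fun x => x) = some (List.foldl max y ys) := by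
      rw [hys]; exact max?_cons y ys
    rw [hmax]
    have hynn : 0 ≤ y := by
      have : y ∈ L := by
        rw [← List.mem_reverse, hys]; exact List.mem_cons_self
      rw [hL] at this
      obtain ⟨d, _, rfl⟩ := List.mem_map.mp this
      positivity
    have hfold : List.foldl max 0 L = List.foldl max y ys := by
      rw [foldl_max_perm L.reverse_perm.symm 0, hys, List.foldl_cons,
        max_eq_right hynn]
    rw [← hfold]
    simp [hL]
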